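-- pv_equiv track=rewrite | github.com/park9707/Algorithm | programmers/표현 가능한 이진트리/표현 가능한 이진트리.py | solution
-- ===== SOURCE A (Python) =====
-- import math
--
-- def check(n, left, right):
--     dif = (right - left) // 2
--     mid = left + dif
--
--     if dif <= 1:
--         if n[mid] == '1' or '1' not in n[left:right+1]:
--             return True
--         return False
--
--     if n[mid] == '0':
--         for i in range(left, right + 1):
--             if n[i] == '1':
--                 return False
--         return True
--     else:
--         if check(n, left, mid - 1):
--             if check(n, mid + 1, right):
--                 return True
--         return False
--
-- def solution(numbers):
--     answer = []
--     for num in numbers: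
--         b = format(num, 'b')
--         length = len(b)
--         n = 2 ** (int(math.log(length, 2)) + 1) - 1
--         b = ('0' * (n - length)) + b
--
--         if check(b, 0, len(b)-1):
--             answer.append(1)
--         else:
--             answer.append(0)
--
--     return answer
-- ===== SOURCE B (Python) =====
-- import math
--
-- def _combine(left, root, right):
--     okL, h1L, _, leafL = left
--     _, _, c, _ = root
--     okR, h1R, _, leafR = right
--     if c == '0' or (leafL and leafR and c != '1'):
--         ok = not h1L and not h1R
--     else:
--         ok = okL and okR
--     return (ok, h1L or h1R or c == '1', c, False)
--
-- def solution(numbers):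
--     answer = []
--     for num in numbers:
--         b = format(num, 'b')
--         length = len(b)
--         n = 2 ** (int(math.log(length, 2)) + 1) - 1
--         b = ('0' * (n - length)) + b
--         arr = [(True, c == '1', c, True) for c in b]
--         while len(arr) > 1:
--             nxt = []
--             i = 0
--             while i + 3 <= len(arr):
--                 nxt.append(_combine(arr[i], arr[i + 1], arr[i + 2]))
--                 if i + 3 < len(arr):
--                     nxt.append(arr[i + 3])
--                 i += 4
--             arr = nxt
--         answer.append(1 if arr[0][0] else 0)
--     return answer
-- ===== Notes on version B (the rewrite author's own statement) =====
-- stated objective: alternative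
-- what changed: The recursive index-range check over the in-order string is replaced by an iterative bottom-up level reduction: each pass combines adjacent (left-subtree, root, right-subtree) summary triples of the in-order array into one subtree summary (ok, has-1, root char, is-leaf), halving the array until a single summary for the whole tree remains.
import Mathlib
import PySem

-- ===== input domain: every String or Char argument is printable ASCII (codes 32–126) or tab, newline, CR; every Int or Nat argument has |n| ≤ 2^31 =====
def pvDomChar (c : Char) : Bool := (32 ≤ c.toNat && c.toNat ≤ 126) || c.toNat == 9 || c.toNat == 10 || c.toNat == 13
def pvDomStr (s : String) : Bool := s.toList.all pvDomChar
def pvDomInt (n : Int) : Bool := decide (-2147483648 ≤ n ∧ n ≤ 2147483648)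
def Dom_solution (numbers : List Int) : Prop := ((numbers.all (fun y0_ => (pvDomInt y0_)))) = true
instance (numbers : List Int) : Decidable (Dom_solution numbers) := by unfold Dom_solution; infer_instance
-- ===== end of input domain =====

-- B replaces A's recursive index-range check by an iterative bottom-up level reduction
-- over subtree summaries (same return values; objective: alternative algorithm).

-- ===== PORT A =====
-- check(n, left, right) of Source A. The 'for i in range(left, right+1): if n[i]=='1': return False / return True'
-- loop is ported as the equivalent foldl with an accumulator that sticks at false.
def check (n : List Char) (left right : Int) : Bool :=
  let dif := PySem.Int.floordiv (right - left) 2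
  let mid := left + dif
  if dif ≤ 1 then
    if (PySem.List.pyGet? n mid == some '1')
        || !((PySem.List.slice n (some left) (some (right + 1))).contains '1') then true
    else false
  else if PySem.List.pyGet? n mid == some '0' then
    (PySem.List.pyRange left (right + 1) 1).foldl
      (fun acc i => if PySem.List.pyGet? n i == some '1' then false else acc) true
  else
    check n left (mid - 1) && check n (mid + 1) right
termination_by (right - left).toNat
decreasing_by
  · have h := PySem.Int.floordiv_mul_add_mod (right - left) 2
    have h0 := PySem.Int.mod_nonneg (right - left) (b := 2) (by norm_num)
    have h2 := PySem.Int.mod_lt (right - left) (b := 2) (by norm_num)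
    omega
  · have h := PySem.Int.floordiv_mul_add_mod (right - left) 2
    have h0 := PySem.Int.mod_nonneg (right - left) (b := 2) (by norm_num)
    have h2 := PySem.Int.mod_lt (right - left) (b := 2) (by norm_num)
    omega

-- int(math.log(length, 2)) is ported as Nat.log 2 length: exact for every length that occurs
-- (1 ≤ length ≤ 34 here; CPython's float log agrees with the integer floor log on this range).
def solution (numbers : List Int) : List Int :=
  numbers.foldl (fun answer num =>
    let b := PySem.Int.toBinChars num
    let length : Int := b.length
    let n : Int := 2 ^ (Nat.log 2 b.length + 1) - 1
    let b := List.replicate (n - length).toNat '0' ++ b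
    if check b 0 (PySem.List.len b - 1) then answer ++ [1] else answer ++ [0]) []

-- ===== PORT B =====
-- summary of a subtree: (ok, has1, char of the root, is a leaf)
def combineB : (Bool × Bool × Char × Bool) → (Bool × Bool × Char × Bool) →
    (Bool × Bool × Char × Bool) → (Bool × Bool × Char × Bool)
  | (okL, h1L, _, leafL), (_, _, c, _), (okR, h1R, _, leafR) =>
    ((if c == '0' || (leafL && leafR && c != '1') then !h1L && !h1R else okL && okR),
     h1L || h1R || (c == '1'), c, false)

-- one pass of Source B's inner while-loop: combine groups of 4 (triple + kept single), final group of 3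
def stepB : List (Bool × Bool × Char × Bool) → List (Bool × Bool × Char × Bool)
  | a :: b :: c :: d :: rest => combineB a b c :: d :: stepB rest
  | [a, b, c] => [combineB a b c]
  | _ => []

-- Source B's 'while len(arr) > 1' loop; the fuel (initial length) always suffices since each pass shrinks arr
def runB : Nat → List (Bool × Bool × Char × Bool) → List (Bool × Bool × Char × Bool)
  | 0, arr => arr
  | f + 1, arr => if 1 < arr.length then runB f (stepB arr) else arr

def solution_alt (numbers : List Int) : List Int :=
  numbers.foldl (fun answer num =>
    let b := PySem.Int.toBinChars num
    let length : Int := b.length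
    let n : Int := 2 ^ (Nat.log 2 b.length + 1) - 1
    let b := List.replicate (n - length).toNat '0' ++ b
    let arr := b.map (fun c => (true, c == '1', c, true))
    let fin := runB arr.length arr
    -- arr[0]: the loop always ends with a single summary, so the default is never read
    answer ++ [if (fin.headD (true, false, '0', true)).1 then 1 else 0]) []

-- ===== PRECONDITION & SPEC =====
def Spec_solution (numbers : List Int) (out : List Int) : Prop := out = solution_alt numbers
instance (numbers : List Int) (out : List Int) : Decidable (Spec_solution numbers out) := by unfold Spec_solution; infer_instance

-- ===== CLAIM (what is proved, stated in full; the proofs are below) =====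
def Claim_equal_solution : Prop := ∀ (numbers : List Int), Dom_solution numbers → Spec_solution numbers (solution numbers)

-- ===== LEMMAS AND PROOFS =====

-- reference spec: A's check on a standalone perfect-tree in-order list of length 2^(m+1)-1
def mcheck : Nat → List Char → Bool
  | 0, _ => true
  | m + 1, s =>
    let c := s.getD (2 ^ (m + 1) - 1) '0'
    if m = 0 then (c == '1') || !(s.any (· == '1'))
    else if c == '0' then !(s.any (· == '1'))
    else mcheck m (s.take (2 ^ (m + 1) - 1)) && mcheck m (s.drop (2 ^ (m + 1)))

-- summary that B's reduction computes for such a list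
def csum : Nat → List Char → (Bool × Bool × Char × Bool)
  | 0, s => (true, s.headD '0' == '1', s.headD '0', true)
  | m + 1, s =>
    let c := s.getD (2 ^ (m + 1) - 1) '0'
    combineB (csum m (s.take (2 ^ (m + 1) - 1))) (true, c == '1', c, true)
      (csum m (s.drop (2 ^ (m + 1))))

-- state of Source B's arr after k reduction passes
def stList : Nat → Nat → List Char → List (Bool × Bool × Char × Bool)
  | _, 0, s => [csum 0 s]
  | k, m + 1, s =>
    if m + 1 ≤ k then [csum (m + 1) s]
    else
      let c := s.getD (2 ^ (m + 1) - 1) '0'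
      stList k m (s.take (2 ^ (m + 1) - 1)) ++ (true, c == '1', c, true) :: stList k m (s.drop (2 ^ (m + 1)))

lemma combineB_ok (x y z : Bool × Bool × Char × Bool) :
    (combineB x y z).1 = if y.2.2.1 == '0' || (x.2.2.2 && z.2.2.2 && y.2.2.1 != '1')
      then !x.2.1 && !z.2.1 else x.1 && z.1 := by
  rcases x with ⟨a, b, c, d⟩; rcases y with ⟨e, f, g, h⟩; rcases z with ⟨i, j, k, l⟩; rfl
lemma combineB_has1 (x y z : Bool × Bool × Char × Bool) :
    (combineB x y z).2.1 = (x.2.1 || z.2.1 || (y.2.2.1 == '1')) := by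
  rcases x with ⟨a, b, c, d⟩; rcases y with ⟨e, f, g, h⟩; rcases z with ⟨i, j, k, l⟩; rfl
lemma combineB_leaf (x y z : Bool × Bool × Char × Bool) : (combineB x y z).2.2.2 = false := by
  rcases x with ⟨a, b, c, d⟩; rcases y with ⟨e, f, g, h⟩; rcases z with ⟨i, j, k, l⟩; rfl

lemma decomp (s : List Char) (k : Nat) (h : k < s.length) :
    s = s.take k ++ s.getD k '0' :: s.drop (k + 1) := by
  conv_lhs => rw [← List.take_append_drop k s]
  rw [List.drop_eq_getElem_cons h, List.getD_eq_getElem s '0' h]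

lemma csum_leaf (m : Nat) (s : List Char) : (csum m s).2.2.2 = decide (m = 0) := by
  cases m with
  | zero => simp [csum]
  | succ m => simp [csum, combineB_leaf]


lemma lens (m : Nat) (s : List Char) (h : s.length = 2 ^ (m + 1 + 1) - 1) :
    (s.take (2 ^ (m + 1) - 1)).length = 2 ^ (m + 1) - 1 ∧
    (s.drop (2 ^ (m + 1))).length = 2 ^ (m + 1) - 1 ∧ 2 ^ (m + 1) - 1 < s.length := by
  rw [show (2:Nat) ^ (m + 1 + 1) = 2 * 2 ^ (m + 1) by ring] at h
  have h1 : 1 ≤ (2:Nat) ^ (m + 1) := Nat.one_le_two_pow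
  set q := (2:Nat) ^ (m + 1) with hq
  rw [List.length_take, List.length_drop]
  omega

lemma csum_has1 (m : Nat) (s : List Char) (h : s.length = 2 ^ (m + 1) - 1) :
    (csum m s).2.1 = s.any (· == '1') := by
  induction m generalizing s with
  | zero =>
    rcases s with _ | ⟨c, _ | ⟨d, t⟩⟩ <;> simp_all [csum]
  | succ m ih =>
    obtain ⟨hL, hR, hk⟩ := lens m s h
    have hsucc : 2 ^ (m + 1) - 1 + 1 = 2 ^ (m + 1) := by
      have h1 : 1 ≤ (2:Nat) ^ (m + 1) := Nat.one_le_two_pow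
      omega
    show (combineB _ _ _).2.1 = _
    rw [combineB_has1, ih _ hL, ih _ hR]
    conv_rhs => rw [decomp s (2 ^ (m + 1) - 1) hk]
    rw [hsucc]
    simp only [List.any_append, List.any_cons]
    cases (s.take (2 ^ (m + 1) - 1)).any (· == '1') <;>
      cases (s.drop (2 ^ (m + 1))).any (· == '1') <;>
      cases (s.getD (2 ^ (m + 1) - 1) '0' == '1') <;> simp

lemma csum_ok (m : Nat) (s : List Char) (h : s.length = 2 ^ (m + 1) - 1) :
    (csum m s).1 = mcheck m s := by
  induction m generalizing s with
  | zero => simp [csum, mcheck]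
  | succ m ih =>
    obtain ⟨hL, hR, hk⟩ := lens m s h
    have hsucc : 2 ^ (m + 1) - 1 + 1 = 2 ^ (m + 1) := by
      have h1 : 1 ≤ (2:Nat) ^ (m + 1) := Nat.one_le_two_pow
      omega
    have hanys : s.any (· == '1')
        = ((s.take (2 ^ (m + 1) - 1)).any (· == '1') || (s.getD (2 ^ (m + 1) - 1) '0' == '1')
            || (s.drop (2 ^ (m + 1))).any (· == '1')) := by
      conv_lhs => rw [decomp s (2 ^ (m + 1) - 1) hk]
      rw [hsucc]
      simp only [List.any_append, List.any_cons]
      cases (s.take (2 ^ (m + 1) - 1)).any (· == '1') <;>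
        cases (s.drop (2 ^ (m + 1))).any (· == '1') <;>
        cases (s.getD (2 ^ (m + 1) - 1) '0' == '1') <;> simp
    show (combineB _ _ _).1 = _
    rw [combineB_ok, csum_leaf, csum_leaf, csum_has1 _ _ hL, csum_has1 _ _ hR, ih _ hL, ih _ hR]
    rw [mcheck]
    simp only []
    set x := s.getD (2 ^ (m + 1) - 1) '0' with hx
    by_cases hm : m = 0
    · subst hm
      by_cases hx1 : x = '1'
      · rw [hx1]
        simp [mcheck]
      · have e1 : (x == '1') = false := by simp [hx1]
        have e2 : (x != '1') = true := by simp [bne, hx1]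
        simp only [e1, e2, decide_true, Bool.and_true, Bool.or_true, if_true, Bool.false_or]
        rw [hanys, e1]
        cases (s.take (2 ^ (0 + 1) - 1)).any (· == '1') <;>
          cases (s.drop (2 ^ (0 + 1))).any (· == '1') <;> simp
    · have hmd : decide (m = 0) = false := by simp [hm]
      simp only [hmd, Bool.false_and, Bool.and_false, Bool.or_false, if_neg hm]
      by_cases hx0 : x = '0'
      · have e0 : (x == '0') = true := by simp [hx0]
        simp only [e0, if_true]
        rw [hanys]
        have e1 : (x == '1') = false := by simp [hx0]
        rw [e1]
        cases (s.take (2 ^ (m + 1) - 1)).any (· == '1') <;>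
          cases (s.drop (2 ^ (m + 1))).any (· == '1') <;> simp
      · have e0 : (x == '0') = false := by simp [hx0]
        rw [e0]
        simp

lemma stList_zero (m : Nat) (s : List Char) (h : s.length = 2 ^ (m + 1) - 1) :
    stList 0 m s = s.map (fun c => (true, c == '1', c, true)) := by
  induction m generalizing s with
  | zero =>
    rcases s with _ | ⟨c, _ | ⟨d, t⟩⟩ <;> simp_all [stList, csum]
  | succ m ih =>
    obtain ⟨hL, hR, hk⟩ := lens m s h
    have hsucc : 2 ^ (m + 1) - 1 + 1 = 2 ^ (m + 1) := by
      have h1 : 1 ≤ (2:Nat) ^ (m + 1) := Nat.one_le_two_pow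
      omega
    rw [stList]
    rw [if_neg (Nat.not_succ_le_zero m)]
    rw [ih _ hL, ih _ hR]
    conv_rhs => rw [decomp s (2 ^ (m + 1) - 1) hk]
    rw [hsucc]
    simp

lemma stList_len (k m : Nat) (s : List Char) (h : k ≤ m) :
    (stList k m s).length = 2 ^ (m + 1 - k) - 1 := by
  induction m generalizing s with
  | zero =>
    interval_cases k
    simp [stList]
  | succ m ih =>
    rw [stList]
    by_cases hk : m + 1 ≤ k
    · have : m + 1 = k := by omega
      subst this
      simp
    · have hk' : k ≤ m := by omega
      simp only [if_neg hk]
      rw [List.length_append, List.length_cons, ih _ hk', ih _ hk']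
      have h1 : 1 ≤ (2:Nat) ^ (m - k) := Nat.one_le_two_pow
      have hp : (2:Nat) ^ (m + 1 + 1 - k) = 2 * 2 ^ (m + 1 - k) := by
        rw [show m + 1 + 1 - k = (m + 1 - k) + 1 by omega]; ring
      have hp2 : (2:Nat) ^ (m + 1 - k) = 2 * 2 ^ (m - k) := by
        rw [show m + 1 - k = (m - k) + 1 by omega]; ring
      omega

lemma stList_full (k m : Nat) (s : List Char) (h : m ≤ k) : stList k m s = [csum m s] := by
  cases m with
  | zero => rfl
  | succ m => rw [stList, if_pos h]

lemma stepB_cons4 (a b c d : Bool × Bool × Char × Bool) (rest : List (Bool × Bool × Char × Bool)) :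
    stepB (a :: b :: c :: d :: rest) = combineB a b c :: d :: stepB rest := rfl
lemma stepB_three (a b c : Bool × Bool × Char × Bool) : stepB [a, b, c] = [combineB a b c] := rfl

lemma stepB_append (X : List (Bool × Bool × Char × Bool)) (y : Bool × Bool × Char × Bool)
    (Z : List (Bool × Bool × Char × Bool)) (h : X.length % 4 = 3) :
    stepB (X ++ y :: Z) = stepB X ++ y :: stepB Z := by
  match X with
  | [] => simp at h
  | [a] => simp at h
  | [a, b] => simp at h
  | [a, b, c] =>
    simp only [List.cons_append, List.nil_append, stepB_cons4, stepB_three]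
  | a :: b :: c :: d :: rest =>
    have h' : rest.length % 4 = 3 := by simp [List.length_cons] at h; omega
    simp only [List.cons_append, stepB_cons4, stepB_append rest y Z h', List.cons_append]

lemma stList_step (m k : Nat) (s : List Char) (hk : k < m) (h : s.length = 2 ^ (m + 1) - 1) :
    stepB (stList k m s) = stList (k + 1) m s := by
  induction m generalizing s k with
  | zero => omega
  | succ m ih =>
    obtain ⟨hL, hR, _⟩ := lens m s h
    rw [stList, if_neg (by omega)]
    rcases Nat.lt_or_ge k m with hkm | hkm
    · have hlen : (stList k m (s.take (2 ^ (m + 1) - 1))).length = 2 ^ (m + 1 - k) - 1 :=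
        stList_len k m _ (by omega)
      have hmod : (stList k m (s.take (2 ^ (m + 1) - 1))).length % 4 = 3 := by
        obtain ⟨c, hc, hc1⟩ : ∃ c, (2:Nat) ^ (m + 1 - k) = 4 * c ∧ 1 ≤ c :=
          ⟨2 ^ (m - 1 - k), by rw [show m + 1 - k = (m - 1 - k) + 2 by omega]; ring,
            Nat.one_le_two_pow⟩
        rw [hlen, hc]
        omega
      rw [stepB_append _ _ _ hmod, ih k _ hkm hL, ih k _ hkm hR,
        stList, if_neg (by omega)]
    · have hkm' : k = m := by omega
      subst hkm'
      rw [stList_full k k _ le_rfl, stList_full k k _ le_rfl,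
        stList_full (k + 1) (k + 1) s le_rfl]
      simp only [List.singleton_append]
      rw [stepB_three, csum]

lemma runB_single (f : Nat) (x : Bool × Bool × Char × Bool) : runB f [x] = [x] := by
  cases f <;> simp [runB]

lemma runB_stList (f m k : Nat) (s : List Char) (hk : k ≤ m) (hf : m - k ≤ f)
    (h : s.length = 2 ^ (m + 1) - 1) : runB f (stList k m s) = [csum m s] := by
  induction f generalizing k with
  | zero =>
    have : k = m := by omega
    subst this
    rw [stList_full _ _ _ le_rfl, runB]
  | succ f ih =>
    rcases Nat.lt_or_ge k m with hkm | hkm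
    · rw [runB]
      have hlen : (stList k m s).length = 2 ^ (m + 1 - k) - 1 := stList_len k m s hk
      have hgt : 1 < (stList k m s).length := by
        obtain ⟨c, hc, hc1⟩ : ∃ c, (2:Nat) ^ (m + 1 - k) = 4 * c ∧ 1 ≤ c :=
          ⟨2 ^ (m - 1 - k), by rw [show m + 1 - k = (m - 1 - k) + 2 by omega]; ring,
            Nat.one_le_two_pow⟩
        rw [hlen, hc]
        omega
      rw [if_pos hgt, stList_step m k s hkm h]
      exact ih (k + 1) (by omega) (by omega)
    · have : k = m := by omega
      subst this
      rw [stList_full _ _ _ le_rfl, runB_single]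
lemma any_scan (s pre post : List Char) :
    ((PySem.List.pyRange (pre.length : Int) ((pre.length : Int) + (s.length : Int)) 1).any
      (fun i => PySem.List.pyGet? (pre ++ s ++ post) i == some '1')) = s.any (· == '1') := by
  induction s generalizing pre with
  | nil => simp [PySem.List.pyRange_one_eq_nil]
  | cons c t ih =>
    rw [PySem.List.pyRange_one_cons (by simp)]
    have h1 : PySem.List.pyGet? (pre ++ (c :: t) ++ post) (pre.length : Int) = some c := by
      rw [List.append_assoc]
      exact PySem.List.pyGet?_append_length pre (t ++ post) c
    have h2 := ih (pre ++ [c])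
    rw [List.any_cons, h1]
    have e3 : (pre ++ [c]) ++ t ++ post = pre ++ c :: t ++ post := by simp
    rw [e3] at h2
    have e2 : (((pre ++ [c]).length : Nat) : Int) = (pre.length : Int) + 1 := by simp
    rw [e2] at h2
    have e4 : (pre.length : Int) + ((c :: t).length : Int) = (pre.length : Int) + 1 + (t.length : Int) := by
      simp; ring
    rw [e4, h2]
    simp

lemma slice_mid (pre s post : List Char) :
    PySem.List.slice (pre ++ s ++ post) (some (pre.length : Int))
      (some ((pre.length : Int) + (s.length : Int))) = s := by
  rw [List.append_assoc, PySem.List.slice_natCast_add, List.drop_left, List.take_left]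

lemma pyGet_mid (pre s post : List Char) (k : Nat) (hk : k < s.length) :
    PySem.List.pyGet? (pre ++ s ++ post) ((pre.length : Int) + (k : Int)) = some s[k] := by
  rw [List.append_assoc, PySem.List.pyGet?_append_right, List.getElem?_append_left hk,
    List.getElem?_eq_getElem hk]

lemma checkA_eq (m : Nat) (pre s post : List Char) (h : s.length = 2 ^ (m + 1) - 1) :
    check (pre ++ s ++ post) (pre.length : Int) ((pre.length : Int) + (s.length : Int) - 1)
      = mcheck m s := by
  induction m generalizing pre s post with
  | zero =>
    have hs : s.length = 1 := by simpa using h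
    rw [check]
    rw [show ((pre.length : Int) + ↑s.length - 1 - ↑pre.length) = 0 by rw [hs]; push_cast; ring]
    rw [show PySem.Int.floordiv 0 2 = 0 from rfl]
    rw [if_pos (by norm_num : (0:Int) ≤ 1)]
    rw [show (pre.length : Int) + ↑s.length - 1 + 1 = ↑pre.length + ↑s.length by ring]
    rw [slice_mid]
    rw [add_zero]
    have h0 : (0:Nat) < s.length := by omega
    have := pyGet_mid pre s post 0 h0
    rw [show ((pre.length : Int) + ((0:Nat) : Int)) = (pre.length : Int) by simp] at this
    rw [this]
    rw [show mcheck 0 s = true from rfl]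
    obtain ⟨c, rfl⟩ := List.length_eq_one_iff.mp hs
    rcases eq_or_ne c '1' with rfl | hc
    · simp
    · simp [Ne.symm hc]
  | succ m ih =>
    have h4 : (2:Nat) ^ 2 ≤ 2 ^ (m + 1) ∨ m = 0 := by
      rcases Nat.eq_zero_or_pos m with rfl | hm
      · right; rfl
      · left; exact Nat.pow_le_pow_right (by norm_num) (by omega)
    obtain ⟨hL, hR, hkidx⟩ := lens m s h
    have h1 : 1 ≤ (2:Nat) ^ (m + 1) := Nat.one_le_two_pow
    obtain ⟨T, hT⟩ : ∃ T, (2:Nat) ^ (m + 1) = T + 1 :=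
      ⟨2 ^ (m + 1) - 1, (Nat.succ_pred_eq_of_pos h1).symm⟩
    rw [show (2:Nat) ^ (m + 1 + 1) = 2 * 2 ^ (m + 1) by ring] at h
    rw [check, mcheck]
    rw [hT] at h hL hR hkidx h4 ⊢
    simp only [Nat.add_sub_cancel] at hL hR hkidx ⊢
    have hs2 : s.length = 2 * T + 1 := by omega
    have hTs : T < s.length := by omega
    have hdif : PySem.Int.floordiv (((pre.length : Int) + (s.length : Int) - 1) - (pre.length : Int)) 2
        = (T : Int) := by
      rw [PySem.Int.floordiv_eq_iff_of_pos (by norm_num), hs2]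
      push_cast
      constructor <;> omega
    rw [hdif]
    have hmid := pyGet_mid pre s post T hTs
    have hgetD : s.getD T '0' = s[T] := List.getD_eq_getElem s '0' hTs
    rcases Nat.eq_zero_or_pos m with rfl | hm
    · -- size-3 base case
      have hT1 : T = 1 := by norm_num at hT; omega
      subst hT1
      rw [if_pos (by norm_num : ((1:Nat) : Int) ≤ 1)]
      rw [show ((pre.length : Int) + (s.length : Int) - 1 + 1) = (pre.length : Int) + (s.length : Int) by ring]
      rw [slice_mid, hmid, if_pos (show (0:Nat) = 0 from rfl), hgetD]
      rw [List.contains_eq_any_beq]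
      have hcomm : (s.any fun x => '1' == x) = s.any (· == '1') := by
        simp [Bool.beq_comm]
      rw [hcomm]
      cases hx : (s[1] == '1') <;> cases hy : s.any (· == '1') <;> simp [hx]
    · -- recursive case
      have hT3 : 3 ≤ T := by rcases h4 with h4 | h4 <;> omega
      rw [if_neg (by omega : ¬ ((T : Nat) : Int) ≤ 1), if_neg (by omega : ¬ m = 0)]
      rw [hmid, hgetD]
      have hd : s.take T ++ s[T] :: s.drop (T + 1) = s := by
        rw [← hgetD]; exact (decomp s T hTs).symm
      have hsplit : pre ++ s ++ post = pre ++ s.take T ++ (s[T] :: (s.drop (T + 1) ++ post)) := by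
        calc pre ++ s ++ post = pre ++ (s.take T ++ s[T] :: s.drop (T + 1)) ++ post := by rw [hd]
          _ = pre ++ s.take T ++ (s[T] :: (s.drop (T + 1) ++ post)) := by
              simp only [List.append_assoc, List.cons_append]
      by_cases hc0 : s[T] = '0'
      · rw [if_pos (by simp [hc0]), if_pos (by simp [hc0])]
        rw [PySem.List.foldl_if_false_eq]
        rw [show ((pre.length : Int) + (s.length : Int) - 1 + 1) = (pre.length : Int) + (s.length : Int) by ring]
        rw [any_scan]
        simp
      · rw [if_neg (by simp [hc0]), if_neg (by simp [hc0])]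
        have hL' : (s.take T).length = 2 ^ (m + 1) - 1 := by rw [hT]; omega
        have hR' : (s.drop (T + 1)).length = 2 ^ (m + 1) - 1 := by rw [hT]; omega
        have IHL := ih pre (s.take T) ((s[T] :: (s.drop (T + 1) ++ post))) hL'
        have IHR := ih (pre ++ s.take T ++ [s[T]]) (s.drop (T + 1)) post hR'
        rw [← hsplit] at IHL
        rw [show ((s.take T).length : Int) = (T : Int) by rw [hL]] at IHL
        have hlen3 : (pre ++ s.take T ++ [s[T]]).length = pre.length + T + 1 := by
          simp only [List.length_append, List.length_cons, List.length_nil, hL]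
        rw [show (((pre ++ s.take T ++ [s[T]]).length : Nat) : Int) = (pre.length : Int) + (T : Int) + 1 by
          rw [hlen3]; push_cast; ring] at IHR
        have hstr : pre ++ s.take T ++ [s[T]] ++ s.drop (T + 1) ++ post = pre ++ s ++ post := by
          conv_rhs => rw [← hd]
          simp only [List.append_assoc, List.cons_append, List.nil_append]
        rw [hstr] at IHR
        rw [show ((s.drop (T + 1)).length : Int) = (T : Int) by rw [hR]] at IHR
        rw [IHL]
        rw [show ((pre.length : Int) + (s.length : Int) - 1) = (pre.length : Int) + (T : Int) + 1 + (T : Int) - 1 by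
          rw [hs2]; push_cast; ring]
        rw [IHR]

lemma pernum (acc : List Int) (num : Int) :
    (let b := PySem.Int.toBinChars num
     let length : Int := b.length
     let n : Int := 2 ^ (Nat.log 2 b.length + 1) - 1
     let b := List.replicate (n - length).toNat '0' ++ b
     if check b 0 (PySem.List.len b - 1) then acc ++ [1] else acc ++ [0])
    = (let b := PySem.Int.toBinChars num
       let length : Int := b.length
       let n : Int := 2 ^ (Nat.log 2 b.length + 1) - 1
       let b := List.replicate (n - length).toNat '0' ++ b
       let arr := b.map (fun c => (true, c == '1', c, true))
       let fin := runB arr.length arr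
       acc ++ [if (fin.headD (true, false, '0', true)).1 then 1 else 0]) := by
  simp only []
  set b := PySem.Int.toBinChars num with hb
  set K := Nat.log 2 b.length with hK
  set pad := List.replicate (((2:Int) ^ (K + 1) - 1 - (b.length : Int))).toNat '0' ++ b with hpad
  obtain ⟨P, hP⟩ : ∃ P, (2:Nat) ^ (K + 1) = P := ⟨_, rfl⟩
  have hlt : b.length < P := by
    rw [← hP, hK]
    exact Nat.lt_pow_succ_log_self (by norm_num) _
  have htn : ((2:Int) ^ (K + 1) - 1 - (b.length : Int)).toNat = P - 1 - b.length := by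
    have hcast : ((2:Int) ^ (K + 1)) = (P : Int) := by rw [← hP]; push_cast; ring
    rw [hcast]
    omega
  have hlenpad : pad.length = 2 ^ (K + 1) - 1 := by
    rw [hpad, List.length_append, List.length_replicate, htn, hP]
    omega
  have hA : check pad 0 (PySem.List.len pad - 1) = mcheck K pad := by
    have hca := checkA_eq K [] pad [] hlenpad
    simpa [PySem.List.len_eq] using hca
  have hfuel : K - 0 ≤ (stList 0 K pad).length := by
    rw [stList_len 0 K pad (Nat.zero_le _)]
    obtain ⟨Q, hQ⟩ : ∃ Q, (2:Nat) ^ K = Q := ⟨_, rfl⟩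
    have hq1 : K < Q := by rw [← hQ]; exact Nat.lt_two_pow_self
    have hq2 : (2:Nat) ^ (K + 1 - 0) = 2 * Q := by rw [Nat.sub_zero, pow_succ, hQ]; ring
    rw [hq2]
    omega
  have hB : runB (pad.map (fun c => (true, c == '1', c, true))).length
      (pad.map (fun c => (true, c == '1', c, true))) = [csum K pad] := by
    rw [← stList_zero K pad hlenpad]
    exact runB_stList _ K 0 pad (Nat.zero_le K) hfuel hlenpad
  rw [hA, hB]
  rw [show ([csum K pad].headD (true, false, '0', true)) = csum K pad from rfl]
  rw [csum_ok K pad hlenpad]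
  cases mcheck K pad <;> simp

-- ===== VERDICT (by name: the statement is the Claim_ definition above) =====
theorem solution_spec : Claim_equal_solution := by
  intro numbers _
  show solution numbers = solution_alt numbers
  unfold solution solution_alt
  apply PySem.List.foldl_congr_mem
  intro acc num _
  exact pernum acc num
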